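-- pv_equiv track=rewrite | github.com/Hoegh07/Project-Euler | Euler787/Euler787.py | grundy
-- ===== SOURCE A (Python) =====
-- import math
--
-- def mex(A):
--     m = 0
--     for a in A:
--         m = max(m,a)
--     for i in range(0,m+2):
--         if(i not in A):
--             return i
--
-- g = {}
--
-- def grundy(a,b):
--     if((a,b) in g):
--         return g[(a,b)]
--
--     if(math.gcd(a,b) > 1):
--         g[(a,b)] = 0
--         return 0
--
--     B = []
--     for c in range(0,a+1):
--         for d in range(0,b+1):
--             if(a*d-b*c in [-1,1]):
--                 B.append(grundy(a-c,b-d))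
--     v = mex(B)
--     g[(a,b)] = v
--     return v
-- ===== SOURCE B (Python) =====
-- import math
--
-- _g = {}
--
-- def grundy(a, b):
--     # Solve a*d - b*c = +-1 directly: for each d, c is determined by division,
--     # so the O(a*b) rectangle scan becomes an O(b) scan per node.
--     if (a, b) in _g:
--         return _g[(a, b)]
--     if math.gcd(a, b) > 1:
--         _g[(a, b)] = 0
--         return 0
--     vals = set()
--     if a >= 0:  # no c with 0 <= c <= a exists otherwise
--         for d in range(0, b + 1):
--             for s in (-1, 1):
--                 t = a * d - s
--                 if b != 0 and t % b == 0:
--                     c = t // b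
--                     if 0 <= c <= a:
--                         vals.add(grundy(a - c, b - d))
--     v = 0
--     while v in vals:
--         v += 1
--     _g[(a, b)] = v
--     return v
-- ===== Notes on version B (the rewrite author's own statement) =====
-- stated objective: alternative
-- what changed: Instead of scanning the whole (a+1)x(b+1) rectangle for pairs with a*d-b*c = +-1, B enumerates only d in 0..b and solves the Diophantine equation for c by division (t % b == 0, c = t // b), collects child Grundy values in a set, and computes the mex by incrementing while the value is in the set.
import Mathlib
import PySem

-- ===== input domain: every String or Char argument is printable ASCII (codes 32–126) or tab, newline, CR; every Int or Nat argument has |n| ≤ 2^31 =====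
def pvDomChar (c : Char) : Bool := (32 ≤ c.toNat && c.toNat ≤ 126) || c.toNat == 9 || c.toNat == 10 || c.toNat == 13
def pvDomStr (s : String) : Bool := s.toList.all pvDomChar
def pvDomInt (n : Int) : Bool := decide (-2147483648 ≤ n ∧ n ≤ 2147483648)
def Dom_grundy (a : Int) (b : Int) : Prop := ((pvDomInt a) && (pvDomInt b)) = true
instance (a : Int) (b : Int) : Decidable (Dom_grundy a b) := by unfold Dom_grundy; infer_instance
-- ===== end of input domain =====

-- B replaces A's rectangle scan for pairs with a*d-b*c = ±1 by solving the equation for c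
-- by division (one pass over d), and A's list-based mex by a set + increment-while-member mex.
-- A's (and B's) Python memo dict is a pure cross-call cache affecting only speed; the ports
-- compute the same values by plain recursion, made total with a fuel parameter that is always
-- sufficient (each recursive call strictly decreases a+b with both components nonnegative).

-- ===== PORT A =====
-- Python mex(A): fold max, then first i in range(0, m+2) not in A.
-- The `.getD 0` is unreachable: every element of A is ≤ m, so some i < m+2 is free.
def mexA (A : List Int) : Int :=
  let m := A.foldl (fun m a => max m a) 0
  (((PySem.List.pyRange 0 (m + 2)).find? (fun i => !(A.contains i))).getD 0)

def grundyA_go : Nat → Int → Int → Int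
  | 0, _, _ => 0
  | (f+1), a, b =>
    if Int.gcd a b > 1 then 0
    else
      let B := (PySem.List.pyRange 0 (a + 1)).foldl (fun acc c =>
        (PySem.List.pyRange 0 (b + 1)).foldl (fun acc d =>
          if a * d - b * c = -1 ∨ a * d - b * c = 1 then acc ++ [grundyA_go f (a - c) (b - d)]
          else acc) acc) []
      mexA B

def grundy (a : Int) (b : Int) : Int := grundyA_go ((a + b).toNat + 1) a b

-- ===== PORT B =====
-- Python B's `v = 0; while v in vals: v += 1`; fuel |vals|+1 suffices on a duplicate-free set.
def mexB_go : Nat → List Int → Int → Int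
  | 0, _, v => v
  | (f+1), s, v => if s.contains v then mexB_go f s (v + 1) else v

def mexB (s : List Int) : Int := mexB_go (s.length + 1) s 0

def grundyB_go : Nat → Int → Int → Int
  | 0, _, _ => 0
  | (f+1), a, b =>
    if Int.gcd a b > 1 then 0
    else
      let vals : PySem.Set Int :=
        if 0 ≤ a then
          (PySem.List.pyRange 0 (b + 1)).foldl (fun acc d =>
            [(-1 : Int), 1].foldl (fun acc s =>
              if b ≠ 0 ∧ PySem.Int.mod (a * d - s) b = 0 then
                if 0 ≤ PySem.Int.floordiv (a * d - s) b ∧ PySem.Int.floordiv (a * d - s) b ≤ a then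
                  PySem.Set.add acc (grundyB_go f (a - PySem.Int.floordiv (a * d - s) b) (b - d))
                else acc
              else acc) acc) PySem.Set.empty
        else PySem.Set.empty
      mexB vals

def grundy_alt (a : Int) (b : Int) : Int := grundyB_go ((a + b).toNat + 1) a b

-- ===== PRECONDITION & SPEC =====
-- euclidQsum a b = the sum of the quotients of Euclid's algorithm on (a, b); for coprime
-- nonnegative pairs the game chain A recurses along has depth euclidQsum + 1.
-- structural on a fuel bound f ≥ b (the second argument strictly decreases each step,
-- so f = b + 1 steps always suffice and the definition is kernel-reducible)
def euclidQsumF : Nat -> Nat -> Nat -> Nat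
  | 0, _, _ => 0
  | _+1, _, 0 => 0
  | f+1, a, b => a / b + euclidQsumF f b (a % b)

def euclidQsum (a : Nat) (b : Nat) : Nat := euclidQsumF (b + 1) a b

-- Pre_ excludes only coprime nonnegative pairs whose Euclid-quotient sum is at least 9000:
-- A's recursion descends one frame per quotient step, so on those inputs Python A exceeds the
-- interpreter recursion limit and raises RecursionError (the margin below the limit covers
-- interpreter stack overhead); every other input reaches no such depth and A returns there.
def Pre_grundy (a : Int) (b : Int) : Prop :=
  a < 0 ∨ b < 0 ∨ 1 < Int.gcd a b ∨ euclidQsum a.toNat b.toNat < 9000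
instance (a : Int) (b : Int) : Decidable (Pre_grundy a b) := by unfold Pre_grundy; infer_instance
def pvWitness_grundy : Int × Int := (5, 8)

def Spec_grundy (a : Int) (b : Int) (out : Int) : Prop := out = grundy_alt a b
instance (a : Int) (b : Int) (out : Int) : Decidable (Spec_grundy a b out) := by unfold Spec_grundy; infer_instance

-- ===== CLAIM (what is proved, stated in full; the proofs are below) =====
def Claim_equal_grundy : Prop := ∀ (a : Int) (b : Int), Dom_grundy a b → Pre_grundy a b → Spec_grundy a b (grundy a b)

-- ===== LEMMAS AND PROOFS =====

-- generic: membership in a fold that only ever adds (as characterised by P)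
lemma mem_foldl_of_mem_iff {α β : Type} (g : List α → β → List α) (P : β → α → Prop)
    (hg : ∀ acc x y, y ∈ g acc x ↔ y ∈ acc ∨ P x y) :
    ∀ (l : List β) (init : List α) (y : α),
      y ∈ l.foldl g init ↔ y ∈ init ∨ ∃ x ∈ l, P x y := by
  intro l
  induction l with
  | nil => simp
  | cons x xs ih =>
    intro init y
    simp only [List.foldl_cons, ih, hg, List.mem_cons]
    constructor
    · rintro ((h | h) | ⟨z, hz, hP⟩)
      · exact Or.inl h
      · exact Or.inr ⟨x, Or.inl rfl, h⟩
      · exact Or.inr ⟨z, Or.inr hz, hP⟩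
    · rintro (h | ⟨z, (rfl | hz), hP⟩)
      · exact Or.inl (Or.inl h)
      · exact Or.inl (Or.inr hP)
      · exact Or.inr ⟨z, hz, hP⟩

-- find? over a range returns the least element satisfying the predicate
lemma find?_pyRange_eq (p : Int → Bool) :
    ∀ (n : Nat) (lo hi μ : Int), (μ - lo).toNat = n → lo ≤ μ → μ < hi → p μ = true →
      (∀ x, lo ≤ x → x < μ → p x = false) →
      (PySem.List.pyRange lo hi).find? p = some μ := by
  intro n
  induction n with
  | zero =>
    intro lo hi μ hn h1 h2 h3 _
    have : lo = μ := by omega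
    subst this
    rw [PySem.List.pyRange_one_cons (by omega), List.find?_cons, h3]
  | succ k ih =>
    intro lo hi μ hn h1 h2 h3 h4
    have hlo : lo < μ := by omega
    rw [PySem.List.pyRange_one_cons (by omega), List.find?_cons, h4 lo le_rfl hlo]
    exact ih (lo + 1) hi μ (by omega) (by omega) h2 h3 (fun x hx hx' => h4 x (by omega) hx')

lemma mexB_go_spec : ∀ (f : Nat) (s : List Int) (v μ : Int), v ≤ μ → μ ∉ s →
    (∀ x, v ≤ x → x < μ → x ∈ s) → (μ - v).toNat < f → mexB_go f s v = μ := by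
  intro f
  induction f with
  | zero => intro s v μ _ _ _ h; omega
  | succ k ih =>
    intro s v μ h1 h2 h3 h4
    by_cases hv : v = μ
    · subst hv
      have hc : s.contains v = false := by
        simpa [List.contains_eq_mem] using h2
      simp only [mexB_go, hc, Bool.false_eq_true, if_false]
    · have hvμ : v < μ := by omega
      have hvs : s.contains v = true := by
        simpa [List.contains_eq_mem] using h3 v le_rfl hvμ
      simp only [mexB_go, hvs, if_true]
      exact ih s (v + 1) μ (by omega) h2 (fun x hx hx' => h3 x (by omega) hx') (by omega)

-- mexA and mexB agree on lists with the same members (the set one duplicate-free)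
lemma mex_eq (L S : List Int) (h : ∀ x, x ∈ L ↔ x ∈ S) :
    mexA L = mexB S := by
  have hmax := PySem.List.le_foldl_max L (0 : Int)
  rw [show L.foldl max 0 = L.foldl (fun m a => max m a) 0 from rfl] at hmax
  -- the least natural number (as an Int) not in L
  have hex : ∃ n : Nat, (n : Int) ∉ L := by
    refine ⟨((L.foldl (fun m a => max m a) 0).toNat + 1), fun hmem => ?_⟩
    have := hmax.2 _ hmem
    omega
  classical
  set μ : Nat := Nat.find hex with hμdef
  have hμ : (μ : Int) ∉ L := Nat.find_spec hex
  have hmin : ∀ k : Nat, k < μ → (k : Int) ∈ L := by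
    intro k hk
    have := Nat.find_min hex hk
    simpa using this
  have hminI : ∀ x : Int, 0 ≤ x → x < (μ : Int) → x ∈ L := by
    intro x hx hx'
    obtain ⟨k, rfl⟩ := Int.eq_ofNat_of_zero_le hx
    exact hmin k (by exact_mod_cast hx')
  -- A side
  have hA : mexA L = (μ : Int) := by
    have hm0 : (0 : Int) ≤ L.foldl (fun m a => max m a) 0 := hmax.1
    have hlt : (μ : Int) < L.foldl (fun m a => max m a) 0 + 2 := by
      by_cases h0 : μ = 0
      · omega
      · have hmem : ((μ - 1 : Nat) : Int) ∈ L := hmin (μ - 1) (by omega)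
        have := hmax.2 _ hmem
        omega
    have := find?_pyRange_eq (fun i => !(L.contains i)) ((μ : Int) - 0).toNat 0
      (L.foldl (fun m a => max m a) 0 + 2) (μ : Int) rfl (by omega) hlt
      (by simpa [List.contains_eq_mem] using hμ)
      (fun x hx hx' => by simpa [List.contains_eq_mem] using hminI x hx hx')
    simp only [mexA, this, Option.getD_some]
  -- B side
  have hμS : (μ : Int) ∉ S := fun hmem => hμ ((h _).mpr hmem)
  have hminS : ∀ x : Int, 0 ≤ x → x < (μ : Int) → x ∈ S := fun x hx hx' =>
    (h x).mp (hminI x hx hx')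
  have hlen : μ ≤ S.length := by
    have hsub : ((List.range μ).map (fun k : Nat => (k : Int))) ⊆ S := by
      intro x hx
      simp only [List.mem_map, List.mem_range] at hx
      obtain ⟨k, hk, rfl⟩ := hx
      exact hminS k (by positivity) (by exact_mod_cast hk)
    have hnd : ((List.range μ).map (fun k : Nat => (k : Int))).Nodup :=
      (List.nodup_range).map (fun a b hab => by exact_mod_cast hab)
    have := (List.subperm_of_subset hnd hsub).length_le
    simpa using this
  have hB : mexB S = (μ : Int) :=
    mexB_go_spec (S.length + 1) S 0 (μ : Int) (by omega) hμS
      (fun x hx hx' => hminS x hx hx') (by omega)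
  rw [hA, hB]

-- the two move enumerations produce the same set of values
lemma moves_iff (a b x : Int) (F : Int → Int → Int) :
    (∃ c, (0 ≤ c ∧ c < a + 1) ∧ ∃ d, (0 ≤ d ∧ d < b + 1) ∧
        (a * d - b * c = -1 ∨ a * d - b * c = 1) ∧ x = F (a - c) (b - d))
    ↔ (∃ d, (0 ≤ d ∧ d < b + 1) ∧ ∃ s, (s = -1 ∨ s = 1) ∧
        ((b ≠ 0 ∧ PySem.Int.mod (a * d - s) b = 0) ∧
         (0 ≤ PySem.Int.floordiv (a * d - s) b ∧ PySem.Int.floordiv (a * d - s) b ≤ a) ∧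
         x = F (a - PySem.Int.floordiv (a * d - s) b) (b - d))) := by
  constructor
  · rintro ⟨c, hc, d, hd, hs, rfl⟩
    have hb : b ≠ 0 := by
      rintro rfl
      have : d = 0 := by omega
      subst this
      simp at hs
    have heq : a * d - (a * d - b * c) = b * c := by ring
    have hmod : PySem.Int.mod (a * d - (a * d - b * c)) b = 0 := by
      rw [heq, PySem.Int.mod_eq_zero_iff_dvd]
      exact Dvd.intro c rfl
    have hdiv : PySem.Int.floordiv (a * d - (a * d - b * c)) b = c := by
      rw [heq]
      have h1 := PySem.Int.floordiv_mul_add_mod (b * c) b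
      have h2 : PySem.Int.mod (b * c) b = 0 := by
        rw [PySem.Int.mod_eq_zero_iff_dvd]; exact Dvd.intro c rfl
      rw [h2, add_zero] at h1
      exact mul_right_cancel₀ hb (h1.trans (mul_comm b c))
    refine ⟨d, hd, a * d - b * c, by omega, ⟨hb, hmod⟩, ?_, ?_⟩
    · rw [hdiv]; exact ⟨hc.1, by omega⟩
    · rw [hdiv]
  · rintro ⟨d, hd, s, hs, ⟨hb, hmod⟩, hcb, rfl⟩
    have h1 := PySem.Int.floordiv_mul_add_mod (a * d - s) b
    rw [hmod, add_zero] at h1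
    refine ⟨PySem.Int.floordiv (a * d - s) b, ⟨hcb.1, by omega⟩, d, hd, ?_, rfl⟩
    have h2 : b * PySem.Int.floordiv (a * d - s) b = a * d - s := by
      rw [mul_comm]; exact h1
    rcases hs with rfl | rfl <;> omega

-- main fuel-indexed equivalence
lemma go_eq : ∀ (f : Nat) (a b : Int), grundyA_go f a b = grundyB_go f a b := by
  intro f
  induction f with
  | zero => intro a b; rfl
  | succ k ih =>
    intro a b
    have ihfun : ∀ (u v : Int), grundyA_go k u v = grundyB_go k u v := ih
    simp only [grundyA_go, grundyB_go]
    by_cases hg : Int.gcd a b > 1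
    · simp [hg]
    · simp only [hg, if_false]
      apply mex_eq
      intro x
      have hA : x ∈ (PySem.List.pyRange 0 (a + 1)).foldl (fun acc c =>
          (PySem.List.pyRange 0 (b + 1)).foldl (fun acc d =>
            if a * d - b * c = -1 ∨ a * d - b * c = 1 then
              acc ++ [grundyA_go k (a - c) (b - d)]
            else acc) acc) [] ↔
          ∃ c, (0 ≤ c ∧ c < a + 1) ∧ ∃ d, (0 ≤ d ∧ d < b + 1) ∧
            (a * d - b * c = -1 ∨ a * d - b * c = 1) ∧ x = grundyA_go k (a - c) (b - d) := by
        rw [mem_foldl_of_mem_iff _ (fun c y => ∃ d, (0 ≤ d ∧ d < b + 1) ∧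
              (a * d - b * c = -1 ∨ a * d - b * c = 1) ∧ y = grundyA_go k (a - c) (b - d))
            ?_ _ _ x]
        · simp [PySem.List.mem_pyRange_one]
        · intro acc c y
          rw [mem_foldl_of_mem_iff _ (fun d y =>
                (a * d - b * c = -1 ∨ a * d - b * c = 1) ∧ y = grundyA_go k (a - c) (b - d))
              ?_ _ _ y]
          · simp [PySem.List.mem_pyRange_one]
          · intro acc' d y'
            split_ifs with hcond
            · simp only [List.mem_append, List.mem_singleton]
              tauto
            · tauto
      have hB : x ∈ (if 0 ≤ a then
          (PySem.List.pyRange 0 (b + 1)).foldl (fun acc d =>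
            [(-1 : Int), 1].foldl (fun acc s =>
              if b ≠ 0 ∧ PySem.Int.mod (a * d - s) b = 0 then
                if 0 ≤ PySem.Int.floordiv (a * d - s) b ∧ PySem.Int.floordiv (a * d - s) b ≤ a then
                  PySem.Set.add acc (grundyB_go k (a - PySem.Int.floordiv (a * d - s) b) (b - d))
                else acc
              else acc) acc) PySem.Set.empty
          else PySem.Set.empty) ↔
          ∃ d, (0 ≤ d ∧ d < b + 1) ∧ ∃ s, (s = -1 ∨ s = 1) ∧
            ((b ≠ 0 ∧ PySem.Int.mod (a * d - s) b = 0) ∧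
             (0 ≤ PySem.Int.floordiv (a * d - s) b ∧ PySem.Int.floordiv (a * d - s) b ≤ a) ∧
             x = grundyB_go k (a - PySem.Int.floordiv (a * d - s) b) (b - d)) := by
        split_ifs with ha
        case neg =>
          simp only [PySem.Set.empty, List.not_mem_nil, false_iff]
          rintro ⟨d, _, s, _, _, ⟨h0, hle⟩, _⟩
          omega
        rw [mem_foldl_of_mem_iff _ (fun d y => ∃ s, (s = -1 ∨ s = 1) ∧
              ((b ≠ 0 ∧ PySem.Int.mod (a * d - s) b = 0) ∧
               (0 ≤ PySem.Int.floordiv (a * d - s) b ∧ PySem.Int.floordiv (a * d - s) b ≤ a) ∧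
               y = grundyB_go k (a - PySem.Int.floordiv (a * d - s) b) (b - d)))
            ?_ _ _ x]
        · simp [PySem.List.mem_pyRange_one, PySem.Set.empty]
        · intro acc d y
          rw [mem_foldl_of_mem_iff _ (fun s y =>
                (b ≠ 0 ∧ PySem.Int.mod (a * d - s) b = 0) ∧
                (0 ≤ PySem.Int.floordiv (a * d - s) b ∧ PySem.Int.floordiv (a * d - s) b ≤ a) ∧
                y = grundyB_go k (a - PySem.Int.floordiv (a * d - s) b) (b - d))
              ?_ _ _ y]
          · constructor
            · rintro (hy | ⟨s, hsmem, hrest⟩)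
              · exact Or.inl hy
              · refine Or.inr ⟨s, ?_, hrest⟩
                simpa using hsmem
            · rintro (hy | ⟨s, hsor, hrest⟩)
              · exact Or.inl hy
              · exact Or.inr ⟨s, by simpa using hsor, hrest⟩
          · intro acc' s y'
            split_ifs with h1 h2
            · rw [PySem.Set.mem_add]
              tauto
            · tauto
            · tauto
      rw [hA, hB]
      simp only [ihfun]
      exact moves_iff a b x (grundyB_go k)

-- ===== VERDICT (by name: the statement is the Claim_ definition above) =====
theorem grundy_spec : Claim_equal_grundy := by
  intro a b _ hpre
  unfold Spec_grundy grundy grundy_alt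
  rcases hpre with h | h | h | h
  · exact go_eq _ a b
  · exact go_eq _ a b
  · -- the gcd shortcut: both ports return 0 at once, directly from h
    simp [grundyA_go, grundyB_go, h]
  · exact go_eq _ a b
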